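-- pv_equiv track=rewrite | github.com/0marTaha/chatbot | F4_dialog_system_Final.py | lookup_restaurants
-- ===== SOURCE A (Python) =====
-- from typing import List, Dict, Any
--
-- def lookup_restaurants(prefs: Dict[str, str], restaurants: List[Dict[str, str]]):
--     """
--     Find restaurants matching user preferences.
--
--     Args:
--         prefs (Dict[str, str]): User preferences
--         restaurants (List[Dict[str, str]]): List of all restaurants
--
--     Returns:
--         tuple: (all_matches, first_match, remaining_matches)
--     """
--     matches = restaurants
--     for slot, value in prefs.items():
--         if value and value != "none":
--             matches = [r for r in matches if r.get(slot, "").lower() == value]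
--     if not matches:
--         return [], {}, []
--     return matches, matches[0], matches[1:]
-- ===== SOURCE B (Python) =====
-- def lookup_restaurants(prefs, restaurants):
--     pitems = list(prefs.items())
--
--     def ok(r, items):
--         # recursively check every active preference
--         if not items:
--             return True
--         slot, value = items[0]
--         if value and value != "none":
--             if r.get(slot, "").lower() != value:
--                 return False
--         return ok(r, items[1:])
--
--     def collect(rs):
--         # recursively gather matching restaurants, preserving order
--         if not rs:
--             return []
--         rest = collect(rs[1:])
--         return [rs[0]] + rest if ok(rs[0], pitems) else rest
--
--     matches = collect(restaurants)
--     if not matches: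
--         return [], {}, []
--     return matches, matches[0], matches[1:]
-- ===== Notes on version B (the rewrite author's own statement) =====
-- stated objective: alternative
-- what changed: Replaces A's staged per-slot list rebuilds (one filter pass of the whole list per active preference) with explicit structural recursion: a recursive predicate that checks one restaurant against all preferences at once and a recursive collector over the restaurant list.
import Mathlib
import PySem

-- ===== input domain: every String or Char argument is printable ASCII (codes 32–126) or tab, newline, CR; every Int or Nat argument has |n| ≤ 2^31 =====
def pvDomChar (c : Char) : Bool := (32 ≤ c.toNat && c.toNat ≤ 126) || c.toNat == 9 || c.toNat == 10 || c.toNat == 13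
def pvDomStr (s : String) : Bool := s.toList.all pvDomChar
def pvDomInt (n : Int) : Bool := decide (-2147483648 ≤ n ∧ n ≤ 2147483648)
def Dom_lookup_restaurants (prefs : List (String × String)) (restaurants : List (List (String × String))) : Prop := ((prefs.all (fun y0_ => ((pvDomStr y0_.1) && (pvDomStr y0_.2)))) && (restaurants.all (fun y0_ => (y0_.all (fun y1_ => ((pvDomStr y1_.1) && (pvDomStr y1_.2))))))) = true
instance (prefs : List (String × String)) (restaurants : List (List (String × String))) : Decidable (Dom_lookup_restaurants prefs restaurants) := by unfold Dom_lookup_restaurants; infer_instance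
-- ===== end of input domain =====

-- ===== PORT A =====
-- B replaces A's staged per-slot filter passes with explicit structural recursion
-- (a recursive per-restaurant check and a recursive collector); same return value.
def lookup_restaurants (prefs : List (String × String)) (restaurants : List (List (String × String))) : (List (List (String × String))) × (List (String × String)) × (List (List (String × String))) :=
  let ms := prefs.foldl (fun m sv =>
    if sv.2 != "" && sv.2 != "none" then
      m.filter (fun r => PySem.Str.lower (PySem.Dict.getD ⟨r⟩ sv.1 "") == sv.2)
    else m) restaurants
  match ms with
  | [] => ([], [], [])
  | x :: rest => (x :: rest, x, rest)

-- ===== PORT B =====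
-- recursive check of one restaurant against all preference items (Source B's `ok`)
def pvOk (r : List (String × String)) : List (String × String) → Bool
  | [] => true
  | (slot, value) :: rest =>
    if value != "" && value != "none" then
      if PySem.Str.lower (PySem.Dict.getD ⟨r⟩ slot "") != value then false
      else pvOk r rest
    else pvOk r rest

-- recursive collector over the restaurant list (Source B's `collect`)
def pvCollect (prefs : List (String × String)) : List (List (String × String)) → List (List (String × String))
  | [] => []
  | r :: tl =>
    let rest := pvCollect prefs tl
    if pvOk r prefs then r :: rest else rest

def lookup_restaurants_alt (prefs : List (String × String)) (restaurants : List (List (String × String))) : (List (List (String × String))) × (List (String × String)) × (List (List (String × String))) :=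
  match pvCollect prefs restaurants with
  | [] => ([], [], [])
  | x :: rest => (x :: rest, x, rest)

-- ===== PRECONDITION & SPEC =====
def Spec_lookup_restaurants (prefs : List (String × String)) (restaurants : List (List (String × String))) (out : (List (List (String × String))) × (List (String × String)) × (List (List (String × String)))) : Prop := out = lookup_restaurants_alt prefs restaurants
instance (prefs : List (String × String)) (restaurants : List (List (String × String))) (out : (List (List (String × String))) × (List (String × String)) × (List (List (String × String)))) : Decidable (Spec_lookup_restaurants prefs restaurants out) := by unfold Spec_lookup_restaurants; infer_instance

-- ===== CLAIM (what is proved, stated in full; the proofs are below) =====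
def Claim_equal_lookup_restaurants : Prop := ∀ (prefs : List (String × String)) (restaurants : List (List (String × String))), Dom_lookup_restaurants prefs restaurants → Spec_lookup_restaurants prefs restaurants (lookup_restaurants prefs restaurants)

-- ===== LEMMAS AND PROOFS =====

-- B's recursive check equals the conjunction over the active preference slots.
theorem pvOk_eq (r : List (String × String)) (prefs : List (String × String)) :
    pvOk r prefs
    = (prefs.filter (fun sv => sv.2 != "" && sv.2 != "none")).all
        (fun sv => PySem.Str.lower (PySem.Dict.getD ⟨r⟩ sv.1 "") == sv.2) := by
  induction prefs with
  | nil => rfl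
  | cons sv tl ih =>
    obtain ⟨slot, value⟩ := sv
    by_cases h : (value != "" && value != "none") = true
    · simp only [pvOk, h, if_true, List.filter_cons, List.all_cons, ih]
      by_cases h2 : (PySem.Str.lower (PySem.Dict.getD ⟨r⟩ slot "") != value) = true
      · simp_all
      · simp_all
    · simp [pvOk, List.filter_cons, h, ih]

-- B's recursive collector is the one-pass filter by that check.
theorem pvCollect_eq (prefs : List (String × String)) (rs : List (List (String × String))) :
    pvCollect prefs rs = rs.filter (fun r => pvOk r prefs) := by
  induction rs with
  | nil => rfl
  | cons r tl ih => simp [pvCollect, ih, List.filter_cons]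

-- A's left fold of per-slot filters equals one filter by the conjunction of active slots.
theorem pv_fold_filter (prefs : List (String × String)) (ms : List (List (String × String))) :
    prefs.foldl (fun m sv =>
      if sv.2 != "" && sv.2 != "none" then
        m.filter (fun r => PySem.Str.lower (PySem.Dict.getD ⟨r⟩ sv.1 "") == sv.2)
      else m) ms
    = ms.filter (fun r =>
        (prefs.filter (fun sv => sv.2 != "" && sv.2 != "none")).all
          (fun sv => PySem.Str.lower (PySem.Dict.getD ⟨r⟩ sv.1 "") == sv.2)) := by
  induction prefs generalizing ms with
  | nil => simp
  | cons sv tl ih =>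
    by_cases h : (sv.2 != "" && sv.2 != "none") = true
    · rw [List.foldl_cons, if_pos h, ih, List.filter_filter]
      congr 1
      funext r
      simp only [List.filter_cons, h, if_true, List.all_cons]
      exact Bool.and_comm _ _
    · rw [List.foldl_cons, if_neg h, ih]
      congr 1
      funext r
      simp [h]

-- ===== VERDICT (by name: the statement is the Claim_ definition above) =====
theorem lookup_restaurants_spec : Claim_equal_lookup_restaurants := by
  intro prefs restaurants _
  unfold Spec_lookup_restaurants lookup_restaurants lookup_restaurants_alt
  rw [pv_fold_filter, pvCollect_eq]
  have : (fun r => pvOk r prefs) = (fun r =>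
      (prefs.filter (fun sv => sv.2 != "" && sv.2 != "none")).all
        (fun sv => PySem.Str.lower (PySem.Dict.getD ⟨r⟩ sv.1 "") == sv.2)) := by
    funext r; exact pvOk_eq r prefs
  rw [this]
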